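-- pv_equiv track=rewrite | github.com/rusalinastaneva/Python-Fundamentals | 03. Functions/10. Array Manipulator.py | last_even_odd
-- ===== SOURCE A (Python) =====
-- def last_even_odd(nums, count, type):
--     elements = []
--     if type == "even":
--         for i in range(len(nums)-1,-1,-1):
--             if nums[i] % 2 == 0 and len(elements) < count:
--                 elements.append(nums[i])
--     elif type == "odd":
--         for i in range(len(nums)-1,-1,-1):
--             if nums[i] % 2 != 0 and len(elements) < count:
--                 elements.append(nums[i])
--
--     elements.reverse()
--     return elements
-- ===== SOURCE B (Python) =====
-- def last_even_odd(nums, count, type):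
--     if type == "even":
--         pred = lambda n: n % 2 == 0
--     elif type == "odd":
--         pred = lambda n: n % 2 != 0
--     else:
--         return []
--     if count <= 0:
--         return []
--     filtered = [n for n in nums if pred(n)]
--     return filtered[-count:]
-- ===== Notes on version B (the rewrite author's own statement) =====
-- stated objective: simpler
-- what changed: Replaces A's backward index loop that collects up to count matches and then reverses with a forward parity filter followed by a negative tail slice filtered[-count:], guarded by count <= 0.
import Mathlib
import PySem

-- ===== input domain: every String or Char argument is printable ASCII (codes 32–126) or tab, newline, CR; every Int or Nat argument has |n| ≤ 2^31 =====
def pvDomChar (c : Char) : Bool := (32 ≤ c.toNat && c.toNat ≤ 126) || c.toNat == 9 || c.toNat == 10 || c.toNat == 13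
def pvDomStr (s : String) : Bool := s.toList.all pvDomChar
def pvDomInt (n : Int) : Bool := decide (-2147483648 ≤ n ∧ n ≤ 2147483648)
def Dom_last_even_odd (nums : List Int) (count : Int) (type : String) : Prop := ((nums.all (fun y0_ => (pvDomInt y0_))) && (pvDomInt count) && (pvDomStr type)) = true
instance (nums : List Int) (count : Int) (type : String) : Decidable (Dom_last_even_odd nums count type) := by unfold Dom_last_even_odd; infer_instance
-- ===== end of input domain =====

-- B replaces A's backward bounded-collect-then-reverse loop by a forward filter plus a
-- negative tail slice (objective: simpler). Both programs are total; return values only.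

-- ===== PORT A =====
-- A: walk indices from len-1 down to 0, append matching elements while fewer than count
-- are collected, then reverse.
def last_even_odd (nums : List Int) (count : Int) (type : String) : List Int :=
  let elements : List Int :=
    if type = "even" then
      (PySem.List.pyRange ((nums.length : Int) - 1) (-1) (-1)).foldl
        (fun acc i =>
          if PySem.Int.mod (PySem.List.pyGetD nums i 0) 2 = 0 ∧ ((acc.length : Int) < count) then
            acc ++ [PySem.List.pyGetD nums i 0]
          else acc) []
    else if type = "odd" then
      (PySem.List.pyRange ((nums.length : Int) - 1) (-1) (-1)).foldl
        (fun acc i =>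
          if PySem.Int.mod (PySem.List.pyGetD nums i 0) 2 ≠ 0 ∧ ((acc.length : Int) < count) then
            acc ++ [PySem.List.pyGetD nums i 0]
          else acc) []
    else []
  elements.reverse

-- ===== PORT B =====
-- B: pick the parity predicate from `type` (else []), guard count ≤ 0, forward filter, tail slice.
def last_even_odd_alt (nums : List Int) (count : Int) (type : String) : List Int :=
  if type = "even" then
    if count ≤ 0 then []
    else PySem.List.slice (nums.filter (fun n => PySem.Int.mod n 2 = 0)) (some (-count)) none
  else if type = "odd" then
    if count ≤ 0 then []
    else PySem.List.slice (nums.filter (fun n => PySem.Int.mod n 2 ≠ 0)) (some (-count)) none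
  else []

-- ===== PRECONDITION & SPEC =====
def Spec_last_even_odd (nums : List Int) (count : Int) (type : String) (out : List Int) : Prop := out = last_even_odd_alt nums count type
instance (nums : List Int) (count : Int) (type : String) (out : List Int) : Decidable (Spec_last_even_odd nums count type out) := by unfold Spec_last_even_odd; infer_instance

-- ===== CLAIM (what is proved, stated in full; the proofs are below) =====
def Claim_equal_last_even_odd : Prop := ∀ (nums : List Int) (count : Int) (type : String), Dom_last_even_odd nums count type → Spec_last_even_odd nums count type (last_even_odd nums count type)

-- ===== LEMMAS AND PROOFS =====

-- A's bounded collect over a list equals a take of the filtered list.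
theorem pv_collect (p : Int → Prop) [DecidablePred p] (count : Int) :
    ∀ (l acc : List Int),
      l.foldl (fun acc x => if p x ∧ ((acc.length : Int) < count) then acc ++ [x] else acc) acc
        = acc ++ (l.filter (fun x => decide (p x))).take (count.toNat - acc.length) := by
  intro l
  induction l with
  | nil => intro acc; simp
  | cons x l ih =>
    intro acc
    rw [List.foldl_cons, List.filter_cons]
    by_cases hp : p x
    · by_cases hc : ((acc.length : Int) < count)
      · rw [if_pos ⟨hp, hc⟩, ih, if_pos (by simpa using hp)]
        have hlen : count.toNat - acc.length = (count.toNat - (acc ++ [x]).length) + 1 := by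
          simp only [List.length_append, List.length_cons, List.length_nil]; omega
        rw [hlen, List.take_succ_cons]
        simp
      · rw [if_neg (fun h => hc h.2), ih, if_pos (by simpa using hp)]
        have h0 : count.toNat - acc.length = 0 := by omega
        simp [h0]
    · rw [if_neg (fun h => hp h.1), ih, if_neg (by simpa using hp)]

-- one parity branch of A equals the drop form of the tail slice
theorem pv_side (p : Int → Prop) [DecidablePred p] (nums : List Int) (count : Int) :
    ((PySem.List.pyRange ((nums.length : Int) - 1) (-1) (-1)).foldl
      (fun acc i =>
        if p (PySem.List.pyGetD nums i 0) ∧ ((acc.length : Int) < count) then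
          acc ++ [PySem.List.pyGetD nums i 0]
        else acc) []).reverse
      = if count ≤ 0 then []
        else (nums.filter (fun x => decide (p x))).drop
              ((nums.filter (fun x => decide (p x))).length - count.toNat) := by
  have hr : PySem.List.pyRange ((nums.length : Int) - 1) (-1) (-1)
      = (PySem.List.pyRange 0 (nums.length : Int) 1).reverse := by
    rw [PySem.List.pyRange_neg_one_eq_reverse]; norm_num
  have hkey : ∀ (idx : List Int) (init : List Int),
      idx.foldl (fun acc i =>
        if p (PySem.List.pyGetD nums i 0) ∧ ((acc.length : Int) < count) then
          acc ++ [PySem.List.pyGetD nums i 0]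
        else acc) init
      = (idx.map (fun i => PySem.List.pyGetD nums i 0)).foldl
          (fun acc v => if p v ∧ ((acc.length : Int) < count) then acc ++ [v] else acc) init := by
    intro idx
    induction idx with
    | nil => intro init; rfl
    | cons a t ih => intro init; rw [List.foldl_cons, List.map_cons, List.foldl_cons]; exact ih _
  rw [hr, hkey, List.map_reverse, PySem.List.map_pyGetD_pyRange_zero',
      pv_collect p count nums.reverse []]
  simp only [List.nil_append, List.length_nil, Nat.sub_zero, List.filter_reverse]
  by_cases hc : count ≤ 0
  · have h0 : count.toNat = 0 := by omega
    simp [hc, h0]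
  · rw [if_neg hc, List.take_reverse, List.reverse_reverse]

theorem last_even_odd_eq (nums : List Int) (count : Int) (type : String) :
    last_even_odd nums count type = last_even_odd_alt nums count type := by
  have hsl : ∀ (m : List Int), ¬ count ≤ 0 →
      PySem.List.slice m (some (-count)) none = m.drop (m.length - count.toNat) := by
    intro m h
    have hcast : ((count.toNat : Nat) : Int) = count := Int.toNat_of_nonneg (by omega)
    rw [show -count = -((count.toNat : Nat) : Int) by rw [hcast]]
    have hk : 0 < count.toNat := by omega
    exact PySem.List.slice_from_neg_natCast m count.toNat hk
  unfold last_even_odd last_even_odd_alt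
  by_cases he : type = "even"
  · simp only [he, if_pos]
    have h := pv_side (fun n => PySem.Int.mod n 2 = 0) nums count
    rw [h]
    by_cases hc : count ≤ 0
    · simp [hc]
    · simp only [hc, if_false]
      exact (hsl _ hc).symm
  · by_cases ho : type = "odd"
    · simp only [if_neg he, if_pos ho]
      have h := pv_side (fun n => PySem.Int.mod n 2 ≠ 0) nums count
      rw [h]
      by_cases hc : count ≤ 0
      · simp [hc]
      · simp only [hc, if_false]
        exact (hsl _ hc).symm
    · simp [he, ho]

-- ===== VERDICT (by name: the statement is the Claim_ definition above) =====
theorem last_even_odd_spec : Claim_equal_last_even_odd := by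
  intro nums count type _
  exact last_even_odd_eq nums count type
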